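-- pv_equiv track=rewrite | github.com/kdh12345/AlgorithmStudy | 프로그래머스/2/42578. 의상/의상.py | solution
-- ===== SOURCE A (Python) =====
-- def solution(clothes):
--     answer = 1
--     c_dic = dict()
--     for c in clothes:
--         if c[1] not in c_dic:
--             c_dic[c[1]] = [c[0]]
--         elif c[1] in c_dic:
--             c_dic[c[1]] += [c[0]]
--     for i,val in c_dic.items():
--         answer *= (len(val)+1)
--     answer -= 1
--     return answer
-- ===== SOURCE B (Python) =====
-- def solution(clothes):
--     def prod(cats):
--         if not cats:
--             return 1
--         k = cats[0]
--         rest = [c for c in cats if c != k]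
--         return (len(cats) - len(rest) + 1) * prod(rest)
--     return prod([c[1] for c in clothes]) - 1
-- ===== Notes on version B (the rewrite author's own statement) =====
-- stated objective: alternative
-- what changed: Replaces A's dict-of-lists grouping and items pass with a recursive partition: take the first category, filter out all its occurrences (counting them by the length drop), multiply and recurse on the remainder.
import Mathlib
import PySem

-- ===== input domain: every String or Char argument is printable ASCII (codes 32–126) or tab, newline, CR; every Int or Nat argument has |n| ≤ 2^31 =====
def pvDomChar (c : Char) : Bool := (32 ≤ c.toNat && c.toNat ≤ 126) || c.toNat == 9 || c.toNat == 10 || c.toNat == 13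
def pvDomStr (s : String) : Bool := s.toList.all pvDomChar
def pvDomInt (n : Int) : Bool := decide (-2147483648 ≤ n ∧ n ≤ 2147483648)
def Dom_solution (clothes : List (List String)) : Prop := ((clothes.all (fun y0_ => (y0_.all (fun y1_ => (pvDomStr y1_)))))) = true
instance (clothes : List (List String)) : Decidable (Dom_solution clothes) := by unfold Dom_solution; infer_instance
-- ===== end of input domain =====

-- B replaces A's dict-of-lists grouping and items pass with a recursive partition of the
-- category list: peel off the first category, count its occurrences by the length drop of a
-- filter, multiply and recurse on the remainder (alternative decomposition; not claimed faster).

-- ===== PORT A =====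
-- c[1] / c[0] as pyGet?; the .getD "" default is never reached under Pre_solution (every row has length ≥ 2)
def solution (clothes : List (List String)) : Int :=
  let d : PySem.Dict String (List String) := clothes.foldl
    (fun d c =>
      let k := (PySem.List.pyGet? c 1).getD ""
      let v := (PySem.List.pyGet? c 0).getD ""
      if d.contains k = false then d.insert k [v]
      else if d.contains k then d.insert k (d.getD k [] ++ [v])
      else d)
    PySem.Dict.empty
  (d.items.foldl (fun a p => a * ((p.2.length : Int) + 1)) 1) - 1

-- ===== PORT B =====
-- termination helper for pvProd (cited by name in decreasing_by)
theorem pvFilterLt (cats : List String) (h : cats ≠ []) :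
    (cats.filter (fun c => c != cats.head h)).length < cats.length := by
  rw [List.length_filter_lt_length_iff_exists]
  exact ⟨cats.head h, List.head_mem h, by simp⟩

-- the inner recursive helper 'prod' of Source B
def pvProd (cats : List String) : Int :=
  if h : cats = [] then 1
  else
    let k := cats.head h
    let rest := cats.filter (fun c => c != k)
    ((cats.length : Int) - (rest.length : Int) + 1) * pvProd rest
termination_by cats.length
decreasing_by simpa using pvFilterLt cats h

def solution_alt (clothes : List (List String)) : Int :=
  pvProd (clothes.map (fun c => (PySem.List.pyGet? c 1).getD "")) - 1

-- ===== PRECONDITION & SPEC =====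
-- Pre_ excludes rows with fewer than 2 entries, on which the Python A raises IndexError at c[1].
def Pre_solution (clothes : List (List String)) : Prop := ∀ c ∈ clothes, 2 ≤ c.length
instance (clothes : List (List String)) : Decidable (Pre_solution clothes) := by unfold Pre_solution; infer_instance
def pvWitness_solution : List (List String) :=
  [["yellow_hat", "headgear"], ["blue_sunglasses", "eyewear"], ["green_turban", "headgear"]]
def Spec_solution (clothes : List (List String)) (out : Int) : Prop := out = solution_alt clothes
instance (clothes : List (List String)) (out : Int) : Decidable (Spec_solution clothes out) := by unfold Spec_solution; infer_instance

-- ===== CLAIM (what is proved, stated in full; the proofs are below) =====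
def Claim_equal_solution : Prop := ∀ (clothes : List (List String)), Dom_solution clothes → Pre_solution clothes → Spec_solution clothes (solution clothes)

-- ===== LEMMAS AND PROOFS =====

-- A's if/elif update of c_dic is exactly d[k] = d.get(k, []) + [v], i.e. Dict.modify
theorem pvStepEq (d : PySem.Dict String (List String)) (k v : String) :
    (if d.contains k = false then d.insert k [v]
     else if d.contains k then d.insert k (d.getD k [] ++ [v])
     else d) = d.modify k [] (· ++ [v]) := by
  cases h : d.contains k <;>
    simp [h, PySem.Dict.modify, PySem.Dict.getD_of_not_contains, PySem.Dict.getD_eq_get?_getD]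

-- per-key agreement: the length of A's value list at k is the count of k among the categories
theorem pvLenEq (pairs : List (String × String)) (k : String) :
    ((pairs.filter (fun p => p.1 == k)).map (·.2)).length
      = (pairs.map Prod.fst).count k := by
  simp [List.count_eq_countP, List.countP_eq_length_filter, List.filter_map, Function.comp_def]

-- a multiplicative foldl is a product
theorem pvFoldlMul (s : List String) (f : String → Int) (a : Int) :
    s.foldl (fun a k => a * f k) a = a * (s.map f).prod := by
  induction s generalizing a with
  | nil => simp
  | cons x t ih => simp [List.foldl_cons, ih, mul_assoc]

-- B's recursion computes the product over the distinct categories of (count + 1)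
theorem pvProd_eq_aux (n : Nat) : ∀ cats : List String, cats.length ≤ n →
    pvProd cats = ∏ k ∈ cats.toFinset, ((cats.count k : Int) + 1) := by
  induction n with
  | zero =>
    intro cats hlen
    have : cats = [] := List.length_eq_zero_iff.mp (Nat.le_zero.mp hlen)
    subst this; simp [pvProd]
  | succ n ih =>
    intro cats hlen
    by_cases h : cats = []
    · subst h; simp [pvProd]
    · rw [pvProd, dif_neg h]
      set k := cats.head h with hkdef
      set rest := cats.filter (fun c => c != k) with hrestdef
      have hlt : rest.length < cats.length := pvFilterLt cats h
      show ((cats.length : Int) - ((cats.filter (fun c => c != k)).length : Int) + 1)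
            * pvProd (cats.filter (fun c => c != k))
          = ∏ j ∈ cats.toFinset, ((cats.count j : Int) + 1)
      rw [← hrestdef, ih rest (by omega)]
      have hk : k ∈ cats := List.head_mem h
      have hcnt : (cats.length : Int) - (rest.length : Int) = (cats.count k : Int) := by
        have h1 : rest.length = cats.countP (fun c => c != k) := by
          rw [hrestdef, List.countP_eq_length_filter]
        have h2 := List.length_eq_countP_add_countP (p := fun c => c != k) (l := cats)
        have h3 : cats.count k = cats.countP (fun a => decide ¬((a != k) = true)) := by
          rw [List.count_eq_countP]
          congr 1
          funext c
          cases hc : c == k <;> simp [bne, hc]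
        rw [h1, h3]
        omega
      have hrestF : rest.toFinset = cats.toFinset.erase k := by
        ext x
        simp [hrestdef, Finset.mem_erase, bne_iff_ne, and_comm]
      have hrestC : ∀ x ∈ cats.toFinset.erase k,
          ((rest.count x : Int) + 1) = ((cats.count x : Int) + 1) := by
        intro x hx
        have hxk : x ≠ k := (Finset.mem_erase.mp hx).1
        rw [hrestdef]
        rw [List.count_filter (by simp [bne_iff_ne, hxk])]
      rw [hrestF, Finset.prod_congr rfl hrestC, hcnt,
        ← Finset.mul_prod_erase cats.toFinset _ (List.mem_toFinset.mpr hk)]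

theorem pvProd_eq (cats : List String) :
    pvProd cats = ∏ k ∈ cats.toFinset, ((cats.count k : Int) + 1) :=
  pvProd_eq_aux cats.length cats le_rfl

-- ===== VERDICT (by name: the statement is the Claim_ definition above) =====
theorem solution_spec : Claim_equal_solution := by
  intro clothes _ _
  unfold Spec_solution solution solution_alt
  simp only []
  set key : List String → String := fun c => (PySem.List.pyGet? c 1).getD "" with hkey
  set pairs : List (String × String) :=
    clothes.map (fun c => (key c, (PySem.List.pyGet? c 0).getD "")) with hpairs
  have hstep : (fun (d : PySem.Dict String (List String)) (c : List String) =>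
      let k := (PySem.List.pyGet? c 1).getD ""
      let v := (PySem.List.pyGet? c 0).getD ""
      if d.contains k = false then d.insert k [v]
      else if d.contains k then d.insert k (d.getD k [] ++ [v])
      else d)
      = fun d c => d.modify (key c) [] (· ++ [(PySem.List.pyGet? c 0).getD ""]) := by
    funext d c; exact pvStepEq d _ _
  rw [hstep]
  have hfold : clothes.foldl
      (fun d c => d.modify (key c) [] (· ++ [(PySem.List.pyGet? c 0).getD ""])) PySem.Dict.empty
      = pairs.foldl (fun d p => d.modify p.1 [] (· ++ [p.2])) PySem.Dict.empty := by
    rw [hpairs, List.foldl_map]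
  rw [hfold]
  set d := pairs.foldl (fun d p => d.modify p.1 [] (· ++ [p.2])) PySem.Dict.empty with hd
  have hnd : d.keys.Nodup := by
    rw [hd]
    exact PySem.Dict.nodup_keys_foldl_modify_key pairs Prod.fst [] (fun _ p => (· ++ [p.2])) _
      PySem.Dict.nodup_keys_empty
  have hcats : pairs.map Prod.fst = clothes.map key := by
    rw [hpairs, List.map_map]; rfl
  have hkeys : d.keys = PySem.Set.ofList (clothes.map key) := by
    rw [hd, PySem.Dict.keys_foldl_modify_key, ← hcats]
    simp [PySem.Set.update, PySem.Set.ofList, PySem.Dict.keys_empty]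
  have hgetD : ∀ k, d.getD k [] = (pairs.filter (fun p => p.1 == k)).map (·.2) := by
    intro k
    rw [hd, PySem.Dict.getD_foldl_modify_append]
    simp [PySem.Dict.getD_empty]
  have hitems : d.items = d.keys.map (fun k => (k, d.getD k [])) :=
    PySem.Dict.items_eq_map_keys d hnd []
  rw [hitems, List.foldl_map, hkeys]
  set cats := clothes.map key with hc
  have hfun : (fun (a : Int) (k : String) => a * (((d.getD k []).length : Int) + 1))
      = fun (a : Int) (k : String) => a * ((cats.count k : Int) + 1) := by
    funext a k
    rw [hgetD k]
    rw [show ((pairs.filter (fun p => p.1 == k)).map (·.2)).length = cats.count k from by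
      rw [pvLenEq, hcats]]
  have hset : (List.map (fun k => ((cats.count k : Int) + 1)) (PySem.Set.ofList cats)).prod
      = ∏ k ∈ cats.toFinset, ((cats.count k : Int) + 1) := by
    rw [← List.prod_toFinset _ (PySem.Set.nodup_ofList cats)]
    congr 1
    ext x
    simp [PySem.Set.mem_ofList]
  rw [hfun, pvFoldlMul, one_mul, pvProd_eq, hset]
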